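-- pv_equiv track=rewrite | github.com/rafaelmpsantos/pbi-model-layout | pbix_layout_tool.py | classify_tables
-- ===== SOURCE A (Python) =====
-- def classify_tables(table_names, fact_prefixes, dim_prefixes):
--     """
--     Classify tables into facts, dims, or other based on naming conventions.
--
--     Returns: (fact_tables, dim_tables, other_tables) — each a list of table names
--     """
--     fact, dim, other = [], [], []
--     for name in table_names:
--         if any(name.startswith(p) for p in fact_prefixes):
--             fact.append(name)
--         elif any(name.startswith(p) for p in dim_prefixes):
--             dim.append(name)
--         else:
--             other.append(name)
--     return fact, dim, other
-- ===== SOURCE B (Python) =====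
-- def classify_tables(table_names, fact_prefixes, dim_prefixes):
--     """Classify tables into facts, dims, or other based on naming conventions."""
--     is_fact = lambda n: any(n.startswith(p) for p in fact_prefixes)
--     is_dim = lambda n: any(n.startswith(p) for p in dim_prefixes)
--     fact = [n for n in table_names if is_fact(n)]
--     dim = [n for n in table_names if not is_fact(n) and is_dim(n)]
--     other = [n for n in table_names if not is_fact(n) and not is_dim(n)]
--     return fact, dim, other
-- ===== Notes on version B (the rewrite author's own statement) =====
-- stated objective: alternative
-- what changed: Replaces the single accumulate-into-three-lists loop with three independent filter comprehensions over table_names (fact-prefix match; dim-but-not-fact; neither), preserving fact>dim precedence.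
import Mathlib
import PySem

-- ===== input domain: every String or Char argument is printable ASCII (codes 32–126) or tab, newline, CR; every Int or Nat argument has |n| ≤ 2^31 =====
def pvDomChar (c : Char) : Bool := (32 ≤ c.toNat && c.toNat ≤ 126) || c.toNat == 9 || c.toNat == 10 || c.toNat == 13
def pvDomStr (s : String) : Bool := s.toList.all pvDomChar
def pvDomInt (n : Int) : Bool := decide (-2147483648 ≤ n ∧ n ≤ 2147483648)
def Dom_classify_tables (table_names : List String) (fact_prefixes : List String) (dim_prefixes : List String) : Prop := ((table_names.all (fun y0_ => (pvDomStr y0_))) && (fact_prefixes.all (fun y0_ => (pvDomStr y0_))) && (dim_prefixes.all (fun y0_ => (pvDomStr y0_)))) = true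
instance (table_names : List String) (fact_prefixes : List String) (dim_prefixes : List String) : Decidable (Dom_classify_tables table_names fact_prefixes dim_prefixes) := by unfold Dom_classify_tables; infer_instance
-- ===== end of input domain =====

-- ===== PORT A =====
-- A: single loop, classify each name and append to one of three accumulators
def classify_tables (table_names : List String) (fact_prefixes : List String) (dim_prefixes : List String) : List String × List String × List String :=
  table_names.foldl
    (fun acc name =>
      if fact_prefixes.any (fun p => PySem.Str.startswith name p) then
        (acc.1 ++ [name], acc.2.1, acc.2.2)
      else if dim_prefixes.any (fun p => PySem.Str.startswith name p) then
        (acc.1, acc.2.1 ++ [name], acc.2.2)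
      else
        (acc.1, acc.2.1, acc.2.2 ++ [name]))
    ([], [], [])

-- ===== PORT B =====
-- B: three independent filter passes (fact; dim-but-not-fact; neither)
def classify_tables_alt (table_names : List String) (fact_prefixes : List String) (dim_prefixes : List String) : List String × List String × List String :=
  let isFact := fun n => fact_prefixes.any (fun p => PySem.Str.startswith n p)
  let isDim := fun n => dim_prefixes.any (fun p => PySem.Str.startswith n p)
  (table_names.filter isFact,
   table_names.filter (fun n => !isFact n && isDim n),
   table_names.filter (fun n => !isFact n && !isDim n))

-- ===== PRECONDITION & SPEC =====
def Spec_classify_tables (table_names : List String) (fact_prefixes : List String) (dim_prefixes : List String) (out : List String × List String × List String) : Prop := out = classify_tables_alt table_names fact_prefixes dim_prefixes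
instance (table_names : List String) (fact_prefixes : List String) (dim_prefixes : List String) (out : List String × List String × List String) : Decidable (Spec_classify_tables table_names fact_prefixes dim_prefixes out) := by unfold Spec_classify_tables; infer_instance

-- ===== CLAIM (what is proved, stated in full; the proofs are below) =====
def Claim_equal_classify_tables : Prop := ∀ (table_names : List String) (fact_prefixes : List String) (dim_prefixes : List String), Dom_classify_tables table_names fact_prefixes dim_prefixes → Spec_classify_tables table_names fact_prefixes dim_prefixes (classify_tables table_names fact_prefixes dim_prefixes)

-- ===== LEMMAS AND PROOFS =====

-- ===== VERDICT (by name: the statement is the Claim_ definition above) =====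
theorem classify_tables_foldl (fact_prefixes dim_prefixes : List String)
    (table_names : List String) (f d o : List String) :
    table_names.foldl
      (fun acc name =>
        if fact_prefixes.any (fun p => PySem.Str.startswith name p) then
          (acc.1 ++ [name], acc.2.1, acc.2.2)
        else if dim_prefixes.any (fun p => PySem.Str.startswith name p) then
          (acc.1, acc.2.1 ++ [name], acc.2.2)
        else
          (acc.1, acc.2.1, acc.2.2 ++ [name]))
      (f, d, o)
    = (f ++ table_names.filter (fun n => fact_prefixes.any (fun p => PySem.Str.startswith n p)),
       d ++ table_names.filter (fun n => !fact_prefixes.any (fun p => PySem.Str.startswith n p)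
              && dim_prefixes.any (fun p => PySem.Str.startswith n p)),
       o ++ table_names.filter (fun n => !fact_prefixes.any (fun p => PySem.Str.startswith n p)
              && !dim_prefixes.any (fun p => PySem.Str.startswith n p))) := by
  induction table_names generalizing f d o with
  | nil => simp
  | cons hd tl ih =>
    simp only [List.foldl_cons, List.filter_cons]
    by_cases hf : fact_prefixes.any (fun p => PySem.Str.startswith hd p) = true
    · rw [if_pos hf, ih]
      simp at hf ⊢
      obtain ⟨x, hx, hs⟩ := hf
      exact ⟨⟨x, hx, hs⟩, fun h => absurd hs (by simp [h x hx]),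
             fun h => absurd hs (by simp [h x hx])⟩
    · by_cases hdm : dim_prefixes.any (fun p => PySem.Str.startswith hd p) = true
      · rw [if_neg hf, if_pos hdm, ih]
        simp at hf hdm ⊢
        exact ⟨hf, ⟨hf, hdm⟩, fun _ => hdm⟩
      · rw [if_neg hf, if_neg hdm, ih]
        simp at hf hdm ⊢
        exact ⟨hf, fun _ => hdm, hf, hdm⟩

theorem classify_tables_spec : Claim_equal_classify_tables := by
  intro table_names fact_prefixes dim_prefixes _
  unfold Spec_classify_tables classify_tables classify_tables_alt
  simpa using classify_tables_foldl fact_prefixes dim_prefixes table_names [] [] []
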